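-- pv_equiv track=rewrite | github.com/qieqieWWW/Start-up-Evaluation-and-AI-Routing | scripts/M10_PerformanceMonitor.py | _estimate_size
-- ===== SOURCE A (Python) =====
-- from typing import List, Dict, Any, Optional, Tuple, Set, Union
-- from dataclasses import dataclass, asdict, field
--
-- @dataclass
-- class TokenConsumption:
--     """Token消耗记录"""
--     timestamp: float
--     model_name: str
--     prompt_tokens: int
--     completion_tokens: int
--     total_tokens: int
--     estimated_cost: float
--     api_latency: float  # API调用延迟（秒）
--     context: Dict[str, Any] = field(default_factory=dict)  # 调用上下文
--
--     def to_dict(self) -> Dict: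
--         return asdict(self)
--
-- @dataclass
-- class ResourceUsage:
--     """资源使用记录"""
--     timestamp: float
--     cpu_percent: float            # CPU使用率
--     memory_mb: float              # 内存使用（MB）
--     memory_percent: float         # 内存使用率
--     disk_io_read: float           # 磁盘读（MB/s）
--     disk_io_write: float          # 磁盘写（MB/s）
--     network_sent: float           # 网络发送（MB/s）
--     network_received: float       # 网络接收（MB/s）
--     open_files: int               # 打开文件数
--     thread_count: int             # 线程数
--     process_memory_info: Dict[str, Any] = field(default_factory=dict)
--
--     def to_dict(self) -> Dict:
--         return asdict(self)
--
-- def _estimate_size(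
--                   token_records: List[TokenConsumption],
--                   resource_records: List[ResourceUsage]) -> int:
--     """估计数据大小（字节）"""
--     total_size = 0
--
--     # 估计Token记录大小
--     for record in token_records:
--         # 粗略估计：每个记录约500字节
--         total_size += 500
--
--     # 估计资源记录大小
--     for record in resource_records:
--         # 每个资源记录约1KB
--         total_size += 1024
--
--     return total_size
-- ===== SOURCE B (Python) =====
-- def _estimate_size(token_records, resource_records):
--     """估计数据大小（字节）— closed form instead of per-record loops."""
--     return 500 * len(token_records) + 1024 * len(resource_records)
-- ===== Notes on version B (the rewrite author's own statement) =====
-- stated objective: faster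
-- what changed: Replaces the two per-record accumulation loops with the closed form 500*len(token_records) + 1024*len(resource_records).
import Mathlib
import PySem

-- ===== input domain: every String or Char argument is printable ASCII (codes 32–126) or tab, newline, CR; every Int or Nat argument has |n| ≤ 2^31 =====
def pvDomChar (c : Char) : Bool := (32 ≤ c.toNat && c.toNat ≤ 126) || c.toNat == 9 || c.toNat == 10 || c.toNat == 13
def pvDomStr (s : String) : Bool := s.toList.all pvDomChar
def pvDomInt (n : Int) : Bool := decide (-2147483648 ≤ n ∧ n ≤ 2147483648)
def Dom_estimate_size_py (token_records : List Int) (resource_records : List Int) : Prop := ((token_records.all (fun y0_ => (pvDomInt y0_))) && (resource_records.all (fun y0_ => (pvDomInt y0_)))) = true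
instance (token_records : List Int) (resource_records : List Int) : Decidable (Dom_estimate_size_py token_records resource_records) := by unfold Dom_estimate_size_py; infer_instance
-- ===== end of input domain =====

-- B replaces A's two accumulation loops with the closed form 500*len + 1024*len (faster: O(1) vs O(n+m)).

-- ===== PORT A =====
def estimate_size_py (token_records : List Int) (resource_records : List Int) : Int :=
  let total_size : Int := 0
  let total_size := token_records.foldl (fun acc _ => acc + 500) total_size
  let total_size := resource_records.foldl (fun acc _ => acc + 1024) total_size
  total_size

-- ===== PORT B =====
def estimate_size_py_alt (token_records : List Int) (resource_records : List Int) : Int :=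
  500 * (token_records.length : Int) + 1024 * (resource_records.length : Int)

-- ===== PRECONDITION & SPEC =====
def Spec_estimate_size_py (token_records : List Int) (resource_records : List Int) (out : Int) : Prop := out = estimate_size_py_alt token_records resource_records
instance (token_records : List Int) (resource_records : List Int) (out : Int) : Decidable (Spec_estimate_size_py token_records resource_records out) := by unfold Spec_estimate_size_py; infer_instance

-- ===== CLAIM (what is proved, stated in full; the proofs are below) =====
def Claim_equal_estimate_size_py : Prop := ∀ (token_records : List Int) (resource_records : List Int), Dom_estimate_size_py token_records resource_records → Spec_estimate_size_py token_records resource_records (estimate_size_py token_records resource_records)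

-- ===== LEMMAS AND PROOFS =====
theorem foldl_const_add (xs : List Int) (c acc : Int) :
    xs.foldl (fun a _ => a + c) acc = acc + c * xs.length := by
  induction xs generalizing acc with
  | nil => simp
  | cons x t ih => simp [List.foldl, ih]; ring

-- ===== VERDICT (by name: the statement is the Claim_ definition above) =====
theorem estimate_size_py_spec : Claim_equal_estimate_size_py := by
  intro t r _
  unfold Spec_estimate_size_py estimate_size_py estimate_size_py_alt
  simp [foldl_const_add]
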